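-- pv_equiv track=rewrite | github.com/jihuncha/Data_Structure | com/codingTest/2022_kakao_test/six.py | solution
-- ===== SOURCE A (Python) =====
-- def solution(board, skill):
--     minus_list = [x for x in skill if x[0] == 1]
--     plus_list = [x for x in skill if x[0] == 2]
--
--     if len(minus_list) == 0:
--         return len(board) * len(board[0])
--
--     count_dic = {}
--
--     for minus in minus_list:
--         for i in range(minus[1], minus[3] + 1):
--             for j in range(minus[2], minus[4] + 1):
--                 board[i][j] -= minus[5]
--                 if board[i][j] <= 0:
--                     count_dic[(i,j)] = board[i][j]
--
--     if not count_dic: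
--         return len(board) * len(board[0])
--
--     for plus in plus_list:
--         for i in range(plus[1], plus[3] + 1):
--             for j in range(plus[2], plus[4] + 1):
--                 if not count_dic:
--                     break
--                 if (i,j) in count_dic:
--                     count_dic[(i,j)] += plus[5]
--                     if count_dic[(i,j)] > 0:
--                         del count_dic[(i,j)]
--
--     return len(board) * len(board[0]) - len(count_dic.keys())
-- ===== SOURCE B (Python) =====
-- def solution(board, skill):
--     # Closed-form per-cell counting instead of simulating the skills on a mutable
--     # board with a dict of dying cells: a cell ends up "dead" exactly when some
--     # type-1 skill covers it, its value after all decrements is <= 0, and it is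
--     # still <= 0 after adding all covering type-2 increments.  (Does not mutate board.)
--     n, m = len(board), len(board[0])
--     minus = [s for s in skill if s[0] == 1]
--     plus = [s for s in skill if s[0] == 2]
--     dead = 0
--     for i, row in enumerate(board):
--         for j, b in enumerate(row):
--             hit = [s[5] for s in minus if s[1] <= i <= s[3] and s[2] <= j <= s[4]]
--             if not hit:
--                 continue
--             v = b - sum(hit)
--             if v <= 0 and v + sum(s[5] for s in plus if s[1] <= i <= s[3] and s[2] <= j <= s[4]) <= 0:
--                 dead += 1
--     return n * m - dead
-- ===== Notes on version B (the rewrite author's own statement) =====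
-- stated objective: alternative
-- what changed: B replaces A's in-place two-phase simulation (mutating board over every type-1 rectangle while maintaining a dict of dying cells, then replaying type-2 rectangles against that dict) by a closed-form per-cell count: a cell is dead iff some type-1 skill covers it, its value minus the covering type-1 degrees is <= 0, and adding the covering type-2 degrees keeps it <= 0; B does not mutate board (A does).
-- outside the precondition, e.g. on solution([[1, 1]], [[1, 0, 0, 0, 1, 1], [1, 0, 0, 0, 0, -5]]): A returns 0, B returns 1; on solution([[1, 2], [3, 4]], [[1, -2, 0, -1, 1, 3]]): A returns 1, B returns 4; on solution([[1], [1, 2, -1]], [[1, 0, 0, 0, 0, 2]]): A returns 1, B returns 1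
import Mathlib
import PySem

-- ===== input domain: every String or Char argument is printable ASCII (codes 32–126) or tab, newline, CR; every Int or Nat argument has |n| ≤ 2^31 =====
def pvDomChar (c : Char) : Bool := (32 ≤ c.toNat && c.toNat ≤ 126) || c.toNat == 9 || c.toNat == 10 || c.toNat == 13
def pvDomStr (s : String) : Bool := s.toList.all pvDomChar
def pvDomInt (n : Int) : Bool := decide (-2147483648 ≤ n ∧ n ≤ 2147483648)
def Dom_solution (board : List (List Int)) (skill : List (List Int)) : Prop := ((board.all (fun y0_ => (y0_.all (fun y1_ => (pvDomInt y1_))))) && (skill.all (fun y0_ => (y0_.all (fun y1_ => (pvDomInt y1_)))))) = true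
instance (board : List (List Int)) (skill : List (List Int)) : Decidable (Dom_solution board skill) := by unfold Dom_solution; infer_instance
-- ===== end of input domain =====

-- B replaces A's in-place simulation (mutating `board` and maintaining a dict of dying
-- cells over two sequential skill phases) by a closed-form per-cell count; A mutates its
-- `board` argument, B does not — the equivalence proved here is about the return value.

-- ===== PORT A =====
-- board[i][j] -= minus[5]; if board[i][j] <= 0: count_dic[(i,j)] = board[i][j]
-- (indices are in range and nonnegative inside Pre_, so `toNat`-indexing is exact there)
def pvStepMinus (d : Int) (st : List (List Int) × PySem.Dict (Int × Int) Int)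
    (i j : Int) : List (List Int) × PySem.Dict (Int × Int) Int :=
  let row := st.1.getD i.toNat []
  let v := row.getD j.toNat 0 - d
  (st.1.set i.toNat (row.set j.toNat v),
   if v ≤ 0 then st.2.insert (i, j) v else st.2)

-- the two nested `for i in range(minus[1], minus[3]+1): for j in range(minus[2], minus[4]+1)` loops
def pvApplyMinus (st : List (List Int) × PySem.Dict (Int × Int) Int)
    (mns : List Int) : List (List Int) × PySem.Dict (Int × Int) Int :=
  (PySem.List.pyRange (mns.getD 1 0) (mns.getD 3 0 + 1)).foldl (fun st i =>
    (PySem.List.pyRange (mns.getD 2 0) (mns.getD 4 0 + 1)).foldl (fun st j =>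
      pvStepMinus (mns.getD 5 0) st i j) st) st

-- `if not count_dic: break` skips the remaining iterations, which are all no-ops;
-- it is ported as an identity step, which is value-equal
def pvStepPlus (d : Int) (dic : PySem.Dict (Int × Int) Int)
    (i j : Int) : PySem.Dict (Int × Int) Int :=
  if dic.items.isEmpty then dic
  else if dic.contains (i, j) then
    if dic.getD (i, j) 0 + d > 0 then dic.erase (i, j)
    else dic.insert (i, j) (dic.getD (i, j) 0 + d)
  else dic

def pvApplyPlus (dic : PySem.Dict (Int × Int) Int) (pls : List Int) :
    PySem.Dict (Int × Int) Int :=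
  (PySem.List.pyRange (pls.getD 1 0) (pls.getD 3 0 + 1)).foldl (fun dic i =>
    (PySem.List.pyRange (pls.getD 2 0) (pls.getD 4 0 + 1)).foldl (fun dic j =>
      pvStepPlus (pls.getD 5 0) dic i j) dic) dic

-- len(board)*len(board[0]) : A reads the lengths of the (mutated) board, but the
-- mutation never changes a length, so the original board's lengths are the same values
def solution (board : List (List Int)) (skill : List (List Int)) : Int :=
  let minus_list := skill.filter (fun x => x.getD 0 0 == 1)
  let plus_list := skill.filter (fun x => x.getD 0 0 == 2)
  if minus_list.length = 0 then (board.length : Int) * ((board.getD 0 []).length : Int)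
  else
    let st := minus_list.foldl pvApplyMinus (board, PySem.Dict.empty)
    if st.2.items.isEmpty then (board.length : Int) * ((board.getD 0 []).length : Int)
    else
      let dic := plus_list.foldl pvApplyPlus st.2
      (board.length : Int) * ((board.getD 0 []).length : Int) - (dic.size : Int)

-- ===== PORT B =====
-- `s[1] <= i <= s[3] and s[2] <= j <= s[4]` (the rectangle-cover test of Source B)
def pvCovQ (s : List Int) (i j : Int) : Bool :=
  decide (s.getD 1 0 ≤ i ∧ i ≤ s.getD 3 0 ∧ s.getD 2 0 ≤ j ∧ j ≤ s.getD 4 0)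

def solution_alt (board : List (List Int)) (skill : List (List Int)) : Int :=
  let n : Int := board.length
  let m : Int := (board.getD 0 []).length
  let minus := skill.filter (fun s => s.getD 0 0 == 1)
  let plus := skill.filter (fun s => s.getD 0 0 == 2)
  let dead : Int :=
    ((PySem.List.enumerate board).map (fun p =>
      (Int.ofNat ((PySem.List.enumerate p.2).countP (fun q =>
        let hit := (minus.filter (fun s => pvCovQ s p.1 q.1)).map (fun s => s.getD 5 0)
        !hit.isEmpty &&
          (let v := q.2 - hit.sum
           decide (v ≤ 0) &&
           decide (v + ((plus.filter (fun s => pvCovQ s p.1 q.1)).map (fun s => s.getD 5 0)).sum ≤ 0))))))).sum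
  n * m - dead

-- ===== PRECONDITION & SPEC =====
-- Pre_ restricts to the task's natural domain: a nonempty rectangular board and
-- well-formed skills (each a nonempty row, and a type-1/2 row having its six fields
-- with any nonempty rectangle inside the board and a nonnegative degree).  It thereby
-- excludes inputs on which A raises IndexError (empty board, missing skill fields,
-- out-of-range rectangles) and, as malformed input, inputs on which A returns a value
-- only by accident: negative coordinates (Python wraparound), negative degrees (A's
-- dict then keeps stale entries), and ragged boards.
def Pre_solution (board : List (List Int)) (skill : List (List Int)) : Prop :=
  board ≠ [] ∧ (∀ row ∈ board, row.length = (board.getD 0 []).length) ∧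
  ∀ s ∈ skill, s ≠ [] ∧ ((s.getD 0 0 = 1 ∨ s.getD 0 0 = 2) →
    6 ≤ s.length ∧
    (s.getD 1 0 ≤ s.getD 3 0 ∧ s.getD 2 0 ≤ s.getD 4 0 →
      0 ≤ s.getD 1 0 ∧ s.getD 3 0 < (board.length : Int) ∧
      0 ≤ s.getD 2 0 ∧ s.getD 4 0 < ((board.getD 0 []).length : Int) ∧
      0 ≤ s.getD 5 0))
instance (board : List (List Int)) (skill : List (List Int)) : Decidable (Pre_solution board skill) := by
  unfold Pre_solution; infer_instance

def pvWitness_solution : List (List Int) × List (List Int) :=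
  ([[1, 2], [3, 4]], [[1, 0, 0, 1, 1, 2], [2, 0, 0, 0, 0, 5]])

def Spec_solution (board : List (List Int)) (skill : List (List Int)) (out : Int) : Prop := out = solution_alt board skill
instance (board : List (List Int)) (skill : List (List Int)) (out : Int) : Decidable (Spec_solution board skill out) := by unfold Spec_solution; infer_instance

-- ===== CLAIM (what is proved, stated in full; the proofs are below) =====
def Claim_equal_solution : Prop := ∀ (board : List (List Int)) (skill : List (List Int)), Dom_solution board skill → Pre_solution board skill → Spec_solution board skill (solution board skill)

-- ===== LEMMAS AND PROOFS =====

-- proof-side abbreviations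
def pvCovB (s : List Int) (k : Int × Int) : Bool := pvCovQ s k.1 k.2
def pvSumD (l : List (List Int)) (k : Int × Int) : Int :=
  ((l.filter (fun s => pvCovB s k)).map (fun s => s.getD 5 0)).sum
def pvCovAny (l : List (List Int)) (k : Int × Int) : Bool := l.any (fun s => pvCovB s k)
def pvGetv (b : List (List Int)) (k : Int × Int) : Int := (b.getD k.1.toNat []).getD k.2.toNat 0
def pvShape (b : List (List Int)) (n m : Nat) : Prop := b.length = n ∧ ∀ row ∈ b, row.length = m
def pvInG (n m : Nat) (k : Int × Int) : Prop := 0 ≤ k.1 ∧ k.1 < (n : Int) ∧ 0 ≤ k.2 ∧ k.2 < (m : Int)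
def pvCells (s : List Int) : List (Int × Int) :=
  (PySem.List.pyRange (s.getD 1 0) (s.getD 3 0 + 1)) ×ˢ (PySem.List.pyRange (s.getD 2 0) (s.getD 4 0 + 1))
def pvGrid (n m : Nat) : List (Int × Int) :=
  (PySem.List.pyRange 0 n) ×ˢ (PySem.List.pyRange 0 m)
def pvWf (n m : Nat) (s : List Int) : Prop :=
  ∀ k, pvCovB s k = true → pvInG n m k ∧ 0 ≤ s.getD 5 0
-- the per-cell "dead" predicate both programs are shown to count
def pvDead (board : List (List Int)) (minus plus : List (List Int)) (k : Int × Int) : Bool :=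
  pvCovAny minus k &&
    (decide (pvGetv board k - pvSumD minus k ≤ 0) &&
     decide (pvGetv board k - pvSumD minus k + pvSumD plus k ≤ 0))

theorem pv_mem_grid (n m : Nat) (k : Int × Int) : k ∈ pvGrid n m ↔ pvInG n m k := by
  obtain ⟨i, j⟩ := k
  simp [pvGrid, pvInG, List.mem_product, PySem.List.mem_pyRange_one]
  tauto
theorem pv_nodup_grid (n m : Nat) : (pvGrid n m).Nodup :=
  List.Nodup.product (PySem.List.nodup_pyRange_one _ _) (PySem.List.nodup_pyRange_one _ _)

theorem pv_getD_set (l : List Int) (i j : Nat) (a dflt : Int) (hi : i < l.length) :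
    (l.set i a).getD j dflt = if j = i then a else l.getD j dflt := by
  simp only [List.getD_eq_getElem?_getD, List.getElem?_set, hi]
  split
  · next h => simp [h]
  · next h => rw [if_neg (fun e => h e.symm)]

theorem pv_getD_set' (l : List (List Int)) (i j : Nat) (a : List Int) (hi : i < l.length) :
    (l.set i a).getD j [] = if j = i then a else l.getD j [] := by
  simp only [List.getD_eq_getElem?_getD, List.getElem?_set, hi]
  split
  · next h => simp [h]
  · next h => rw [if_neg (fun e => h e.symm)]

theorem pv_stepM_char {n m : Nat} (d : Int) (b : List (List Int)) (dic : PySem.Dict (Int × Int) Int)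
    (k0 : Int × Int) (hb : pvShape b n m) (hk0 : pvInG n m k0) :
    pvShape (pvStepMinus d (b, dic) k0.1 k0.2).1 n m ∧
    (∀ k, pvInG n m k → pvGetv (pvStepMinus d (b, dic) k0.1 k0.2).1 k =
      if k = k0 then pvGetv b k - d else pvGetv b k) ∧
    (∀ k, (pvStepMinus d (b, dic) k0.1 k0.2).2.get? k =
      if k = k0 ∧ pvGetv b k0 - d ≤ 0 then some (pvGetv b k0 - d) else dic.get? k) ∧
    (dic.keys.Nodup → (pvStepMinus d (b, dic) k0.1 k0.2).2.keys.Nodup) := by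
  obtain ⟨hlen, hrows⟩ := hb
  obtain ⟨h1, h2, h3, h4⟩ := hk0
  have hi : k0.1.toNat < b.length := by omega
  have hrow : b.getD k0.1.toNat [] ∈ b := by
    rw [List.getD_eq_getElem?_getD, List.getElem?_eq_getElem hi]
    simp only [Option.getD_some]; exact List.getElem_mem hi
  have hj : k0.2.toNat < (b.getD k0.1.toNat []).length := by
    rw [hrows _ hrow]; omega
  refine ⟨⟨by simp [pvStepMinus, hlen], ?_⟩, ?_, ?_, ?_⟩
  · intro row' hrow'
    rcases List.mem_or_eq_of_mem_set hrow' with h | h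
    · exact hrows _ h
    · subst h
      rw [List.length_set]
      exact hrows _ hrow
  · intro k hk
    obtain ⟨g1, g2, g3, g4⟩ := hk
    simp only [pvStepMinus, pvGetv]
    rw [pv_getD_set' _ _ _ _ hi]
    by_cases hkk : k = k0
    · subst hkk
      rw [if_pos rfl, if_pos rfl, pv_getD_set _ _ _ _ _ hj, if_pos rfl]
    · rw [if_neg hkk]
      by_cases hki : k.1 = k0.1
      · have hkj : k.2 ≠ k0.2 := fun e => hkk (Prod.ext hki e)
        rw [if_pos (by omega), pv_getD_set _ _ _ _ _ hj, if_neg (by omega), hki]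
      · rw [if_neg (by omega)]
  · intro k
    simp only [pvStepMinus]
    have hv : (b.getD k0.1.toNat []).getD k0.2.toNat 0 - d = pvGetv b k0 - d := rfl
    split
    · next hvle =>
        rw [PySem.Dict.get?_insert]
        by_cases hk : k = k0
        · subst hk
          rw [if_pos rfl, if_pos ⟨rfl, hv ▸ hvle⟩]
          exact congrArg some hv
        · rw [if_neg (fun e => hk e), if_neg (fun hc => hk hc.1)]
    · next hvgt =>
        rw [if_neg (fun hc => hvgt (by rw [hv]; exact hc.2))]
  · intro hnd
    simp only [pvStepMinus]
    split
    · exact PySem.Dict.nodup_keys_insert _ _ _ hnd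
    · exact hnd

theorem pv_foldM_char {n m : Nat} (cells : List (Int × Int)) (hnd : cells.Nodup)
    (hin : ∀ k ∈ cells, pvInG n m k) (d : Int) :
    ∀ b dic, pvShape b n m → dic.keys.Nodup →
    pvShape (cells.foldl (fun st k => pvStepMinus d st k.1 k.2) (b, dic)).1 n m ∧
    (cells.foldl (fun st k => pvStepMinus d st k.1 k.2) (b, dic)).2.keys.Nodup ∧
    (∀ k, pvInG n m k → pvGetv (cells.foldl (fun st k => pvStepMinus d st k.1 k.2) (b, dic)).1 k =
      if k ∈ cells then pvGetv b k - d else pvGetv b k) ∧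
    (∀ k, (cells.foldl (fun st k => pvStepMinus d st k.1 k.2) (b, dic)).2.get? k =
      if k ∈ cells ∧ pvGetv b k - d ≤ 0 then some (pvGetv b k - d) else dic.get? k) := by
  induction cells with
  | nil =>
      intro b dic hb hd
      simp [hb, hd]
  | cons c t ih =>
      intro b dic hb hd
      have hc : pvInG n m c := hin c List.mem_cons_self
      have hct : c ∉ t := (List.nodup_cons.mp hnd).1
      obtain ⟨hsh, hgv, hg?, hnd'⟩ := pv_stepM_char (n := n) (m := m) d b dic c hb hc
      obtain ⟨ish, ind, igv, ig?⟩ :=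
        ih (List.nodup_cons.mp hnd).2 (fun k hk => hin k (List.mem_cons_of_mem _ hk))
          (pvStepMinus d (b, dic) c.1 c.2).1 (pvStepMinus d (b, dic) c.1 c.2).2 hsh (hnd' hd)
      refine ⟨ish, ind, ?_, ?_⟩
      · intro k hk
        rw [List.foldl_cons]
        rw [igv k hk]
        by_cases hkt : k ∈ t
        · have hkc : k ≠ c := fun e => hct (e ▸ hkt)
          rw [if_pos hkt, hgv k hk, if_neg hkc, if_pos (List.mem_cons_of_mem _ hkt)]
        · by_cases hkc : k = c
          · subst hkc
            rw [if_neg hkt, hgv k hk, if_pos rfl, if_pos List.mem_cons_self]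
          · rw [if_neg hkt, hgv k hk, if_neg hkc, if_neg (by simp [hkt, hkc])]
      · intro k
        rw [List.foldl_cons, ig? k]
        by_cases hkt : k ∈ t
        · have hkc : k ≠ c := fun e => hct (e ▸ hkt)
          have hkin : pvInG n m k := hin k (List.mem_cons_of_mem _ hkt)
          rw [hgv k hkin, if_neg hkc]
          by_cases hle : pvGetv b k - d ≤ 0
          · rw [if_pos ⟨hkt, hle⟩, if_pos ⟨List.mem_cons_of_mem _ hkt, hle⟩]
          · rw [if_neg (fun hc2 => hle hc2.2), if_neg (fun hc2 => hle hc2.2), hg? k,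
              if_neg (fun hc2 => hkc hc2.1)]
        · by_cases hkc : k = c
          · subst hkc
            rw [if_neg (fun hc2 => hkt hc2.1), hg? k]
            by_cases hle : pvGetv b k - d ≤ 0
            · rw [if_pos ⟨rfl, hle⟩, if_pos ⟨List.mem_cons_self, hle⟩]
            · rw [if_neg (fun hc2 => hle hc2.2), if_neg (fun hc2 => hle hc2.2)]
          · rw [if_neg (fun hc2 => hkt hc2.1), hg? k, if_neg (fun hc2 => hkc hc2.1),
              if_neg (by simp [hkt, hkc])]

theorem pv_foldl_product {α β γ : Type} (l₁ : List α) (l₂ : List β) (g : γ → α × β → γ) (init : γ) :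
    (l₁ ×ˢ l₂).foldl g init = l₁.foldl (fun st a => l₂.foldl (fun st b => g st (a, b)) st) init := by
  induction l₁ generalizing init with
  | nil => rfl
  | cons a t ih =>
      simp only [SProd.sprod, List.product, List.flatMap_cons, List.foldl_append, List.foldl_map,
        List.foldl_cons] at *
      exact ih _

theorem pv_mem_cells (s : List Int) (k : Int × Int) : k ∈ pvCells s ↔ pvCovB s k = true := by
  obtain ⟨i, j⟩ := k
  simp [pvCells, pvCovB, pvCovQ, List.mem_product, PySem.List.mem_pyRange_one, and_assoc]
theorem pv_nodup_cells (s : List Int) : (pvCells s).Nodup :=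
  List.Nodup.product (PySem.List.nodup_pyRange_one _ _) (PySem.List.nodup_pyRange_one _ _)

theorem pv_applyMinus_eq (s : List Int) (b : List (List Int)) (dic : PySem.Dict (Int × Int) Int) :
    pvApplyMinus (b, dic) s =
      (pvCells s).foldl (fun st k => pvStepMinus (s.getD 5 0) st k.1 k.2) (b, dic) := by
  unfold pvApplyMinus pvCells
  exact (pv_foldl_product (PySem.List.pyRange (s.getD 1 0) (s.getD 3 0 + 1))
    (PySem.List.pyRange (s.getD 2 0) (s.getD 4 0 + 1))
    (fun st k => pvStepMinus (s.getD 5 0) st k.1 k.2) (b, dic)).symm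

theorem pv_applyMinus_char {n m : Nat} (s : List Int) (hs : pvWf n m s)
    (b : List (List Int)) (dic : PySem.Dict (Int × Int) Int)
    (hb : pvShape b n m) (hd : dic.keys.Nodup) :
    pvShape (pvApplyMinus (b, dic) s).1 n m ∧
    (pvApplyMinus (b, dic) s).2.keys.Nodup ∧
    (∀ k, pvInG n m k → pvGetv (pvApplyMinus (b, dic) s).1 k =
      pvGetv b k - (if pvCovB s k then s.getD 5 0 else 0)) ∧
    (∀ k, (pvApplyMinus (b, dic) s).2.get? k =
      if pvCovB s k = true ∧ pvGetv b k - s.getD 5 0 ≤ 0 then some (pvGetv b k - s.getD 5 0)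
      else dic.get? k) := by
  rw [pv_applyMinus_eq]
  obtain ⟨ish, ind, igv, ig?⟩ :=
    pv_foldM_char (n := n) (m := m) (pvCells s) (pv_nodup_cells s)
      (fun k hk => (hs k ((pv_mem_cells s k).mp hk)).1) (s.getD 5 0) b dic hb hd
  refine ⟨ish, ind, ?_, ?_⟩
  · intro k hk
    rw [igv k hk]
    by_cases hc : pvCovB s k = true
    · rw [if_pos ((pv_mem_cells s k).mpr hc), if_pos hc]
    · rw [if_neg (fun e => hc ((pv_mem_cells s k).mp e)), if_neg hc]
      exact (sub_zero _).symm
  · intro k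
    rw [ig? k]
    by_cases hc : pvCovB s k = true
    · by_cases hle : pvGetv b k - s.getD 5 0 ≤ 0
      · rw [if_pos ⟨(pv_mem_cells s k).mpr hc, hle⟩, if_pos ⟨hc, hle⟩]
      · rw [if_neg (fun h2 => hle h2.2), if_neg (fun h2 => hle h2.2)]
    · rw [if_neg (fun h2 => hc ((pv_mem_cells s k).mp h2.1)), if_neg (fun h2 => hc h2.1)]

theorem pv_sumD_cons (s : List Int) (l : List (List Int)) (k : Int × Int) :
    pvSumD (s :: l) k = (if pvCovB s k then s.getD 5 0 else 0) + pvSumD l k := by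
  simp only [pvSumD, List.filter_cons]
  split <;> simp

theorem pv_sumD_nonneg {n m : Nat} (l : List (List Int)) (hl : ∀ s ∈ l, pvWf n m s) (k : Int × Int) :
    0 ≤ pvSumD l k := by
  apply List.sum_nonneg
  intro x hx
  simp only [List.mem_map, List.mem_filter] at hx
  obtain ⟨s, ⟨hs, hc⟩, rfl⟩ := hx
  exact (hl s hs k hc).2

theorem pv_sumD_eq_zero (l : List (List Int)) (k : Int × Int) (h : pvCovAny l k = false) :
    pvSumD l k = 0 := by
  have : l.filter (fun s => pvCovB s k) = [] := by
    apply List.filter_eq_nil_iff.mpr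
    intro s hs
    simp only [pvCovAny, List.any_eq_false] at h
    simp [h s hs]
  simp [pvSumD, this]

theorem pv_covAny_cons (s : List Int) (t : List (List Int)) (k : Int × Int) :
    pvCovAny (s :: t) k = (pvCovB s k || pvCovAny t k) := by simp [pvCovAny]

theorem pv_minusPhase_char {n m : Nat} (minus : List (List Int)) (hwf : ∀ s ∈ minus, pvWf n m s) :
    ∀ b dic, pvShape b n m → dic.keys.Nodup →
    pvShape (minus.foldl pvApplyMinus (b, dic)).1 n m ∧
    (minus.foldl pvApplyMinus (b, dic)).2.keys.Nodup ∧
    (∀ k, pvInG n m k → pvGetv (minus.foldl pvApplyMinus (b, dic)).1 k =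
      pvGetv b k - pvSumD minus k) ∧
    (∀ k, (minus.foldl pvApplyMinus (b, dic)).2.get? k =
      if pvCovAny minus k = true ∧ pvGetv b k - pvSumD minus k ≤ 0
      then some (pvGetv b k - pvSumD minus k) else dic.get? k) := by
  induction minus with
  | nil =>
      intro b dic hb hd
      refine ⟨hb, hd, ?_, ?_⟩
      · intro k _; simp [pvSumD]
      · intro k; simp [pvCovAny]
  | cons s t ih =>
      intro b dic hb hd
      have hws : pvWf n m s := hwf s List.mem_cons_self
      have hwt : ∀ s' ∈ t, pvWf n m s' := fun s' h => hwf s' (List.mem_cons_of_mem _ h)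
      obtain ⟨hsh, hnd1, hgv, hg?⟩ := pv_applyMinus_char (n := n) (m := m) s hws b dic hb hd
      obtain ⟨ish, ind, igv, ig?⟩ :=
        ih hwt (pvApplyMinus (b, dic) s).1 (pvApplyMinus (b, dic) s).2 hsh hnd1
      have hSt : ∀ k, 0 ≤ pvSumD t k := fun k => pv_sumD_nonneg (n := n) (m := m) t hwt k
      refine ⟨ish, ind, ?_, ?_⟩
      · intro k hk
        rw [List.foldl_cons, igv k hk, hgv k hk, pv_sumD_cons]
        ring
      · intro k
        rw [List.foldl_cons, ig? k]
        by_cases hC : pvCovAny t k = true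
        · have hkin : pvInG n m k := by
            simp only [pvCovAny, List.any_eq_true] at hC
            obtain ⟨s', hs', hc'⟩ := hC
            exact (hwt s' hs' k hc').1
          rw [hgv k hkin, hg? k]
          have harith : pvGetv b k - (if pvCovB s k then s.getD 5 0 else 0) - pvSumD t k
              = pvGetv b k - pvSumD (s :: t) k := by rw [pv_sumD_cons]; ring
          by_cases hle : pvGetv b k - pvSumD (s :: t) k ≤ 0
          · rw [if_pos ⟨hC, by rw [harith]; exact hle⟩, harith,
              if_pos ⟨by simp [pv_covAny_cons, hC], hle⟩]
          · rw [if_neg (fun h2 => hle (harith ▸ h2.2)), if_neg, if_neg (fun h2 => hle h2.2)]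
            rintro ⟨hcb, hle2⟩
            apply hle
            have h0 := hSt k
            rw [pv_sumD_cons, if_pos hcb]
            omega
        · have hC' : pvCovAny t k = false := by simpa using hC
          have hS0 : pvSumD t k = 0 := pv_sumD_eq_zero t k hC'
          have hAny : pvCovAny (s :: t) k = pvCovB s k := by
            rw [pv_covAny_cons, hC', Bool.or_false]
          rw [if_neg (by simp [hC']), hg? k, hAny, pv_sumD_cons, hS0, add_zero]
          by_cases hcb : pvCovB s k = true
          · simp only [hcb, if_true, true_and]
          · have hcb' : pvCovB s k = false := by simpa using hcb
            simp [hcb']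

theorem pv_find?_filter_ne (l : List ((Int × Int) × Int)) (k k' : Int × Int) (h : k' ≠ k) :
    (l.filter (fun p => !(p.1 == k))).find? (fun p => p.1 == k') = l.find? (fun p => p.1 == k') := by
  induction l with
  | nil => rfl
  | cons p t ih =>
      by_cases hp : p.1 = k
      · rw [List.filter_cons_of_neg (by simp [hp]),
          List.find?_cons_of_neg (by simp [hp]; exact fun e => h e.symm)]
        exact ih
      · rw [List.filter_cons_of_pos (by simp [hp])]
        by_cases hp' : p.1 = k'
        · rw [List.find?_cons_of_pos (by simp [hp']), List.find?_cons_of_pos (by simp [hp'])]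
        · rw [List.find?_cons_of_neg (by simp [hp']), List.find?_cons_of_neg (by simp [hp'])]
          exact ih

theorem pv_get?_erase (d : PySem.Dict (Int × Int) Int) (k k' : Int × Int) :
    (d.erase k).get? k' = if k' = k then none else d.get? k' := by
  obtain ⟨items⟩ := d
  simp only [PySem.Dict.erase, PySem.Dict.get?]
  split
  · next h =>
      subst h
      rw [List.find?_eq_none.mpr]
      · rfl
      · intro p hp
        have := (List.mem_filter.mp hp).2
        simp at this ⊢
        exact this
  · next h =>
      rw [pv_find?_filter_ne _ _ _ h]

theorem pv_nodup_keys_erase (d : PySem.Dict (Int × Int) Int) (k : Int × Int)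
    (h : d.keys.Nodup) : (d.erase k).keys.Nodup := by
  obtain ⟨items⟩ := d
  simp only [PySem.Dict.erase, PySem.Dict.keys] at *
  exact (List.Sublist.map Prod.fst List.filter_sublist).nodup h

theorem pv_get?_of_items_isEmpty (d : PySem.Dict (Int × Int) Int) (h : d.items.isEmpty = true)
    (k : Int × Int) : d.get? k = none := by
  simp only [List.isEmpty_iff] at h
  simp [PySem.Dict.get?, h]

theorem pv_stepP_char (d : Int) (dic : PySem.Dict (Int × Int) Int) (k0 : Int × Int) :
    (∀ k, (pvStepPlus d dic k0.1 k0.2).get? k =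
      if k = k0 then (dic.get? k0).bind (fun v => if 0 < v + d then none else some (v + d))
      else dic.get? k) ∧
    (dic.keys.Nodup → (pvStepPlus d dic k0.1 k0.2).keys.Nodup) := by
  constructor
  · intro k
    unfold pvStepPlus
    split
    · next hemp =>
        by_cases hk : k = k0
        · rw [if_pos hk, pv_get?_of_items_isEmpty dic hemp k, pv_get?_of_items_isEmpty dic hemp k0]
          rfl
        · rw [if_neg hk]
    · next hne =>
        split
        · next hcont =>
            obtain ⟨v, hv⟩ : ∃ v, dic.get? k0 = some v := by
              have := PySem.Dict.contains_eq_isSome_get? dic k0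
              rw [this] at hcont
              exact Option.isSome_iff_exists.mp hcont
            have hgetD : dic.getD (k0.1, k0.2) 0 = v := by
              rw [PySem.Dict.getD_eq_get?_getD]
              show (dic.get? k0).getD 0 = v
              rw [hv]; rfl
            rw [hgetD]
            split
            · next hw =>
                rw [pv_get?_erase]
                by_cases hk : k = k0
                · rw [if_pos hk, if_pos hk, hv]
                  simp [hw]
                · rw [if_neg hk, if_neg hk]
            · next hw =>
                rw [PySem.Dict.get?_insert]
                by_cases hk : k = k0
                · rw [if_pos hk, if_pos hk, hv]
                  simp only [Option.bind]
                  rw [if_neg hw]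
                · rw [if_neg hk, if_neg hk]
        · next hcont =>
            have hnone : dic.get? k0 = none := by
              have := PySem.Dict.contains_eq_isSome_get? dic k0
              rw [Bool.not_eq_true] at hcont
              rw [this] at hcont
              exact Option.not_isSome_iff_eq_none.mp (by simp [hcont])
            by_cases hk : k = k0
            · rw [if_pos hk, hnone, hk, hnone]
              rfl
            · rw [if_neg hk]
  · intro hnd
    unfold pvStepPlus
    split
    · exact hnd
    · split
      · split
        · exact pv_nodup_keys_erase _ _ hnd
        · exact PySem.Dict.nodup_keys_insert _ _ _ hnd
      · exact hnd

theorem pv_foldP_char (cells : List (Int × Int)) (hnd : cells.Nodup) (d : Int) :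
    ∀ dic : PySem.Dict (Int × Int) Int, dic.keys.Nodup →
    ((cells.foldl (fun dic k => pvStepPlus d dic k.1 k.2) dic).keys.Nodup ∧
     ∀ k, (cells.foldl (fun dic k => pvStepPlus d dic k.1 k.2) dic).get? k =
      if k ∈ cells then (dic.get? k).bind (fun v => if 0 < v + d then none else some (v + d))
      else dic.get? k) := by
  induction cells with
  | nil =>
      intro dic hd
      simp [hd]
  | cons c t ih =>
      intro dic hd
      have hct : c ∉ t := (List.nodup_cons.mp hnd).1
      obtain ⟨hstep, hstepnd⟩ := pv_stepP_char d dic c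
      obtain ⟨ind, ig?⟩ := (ih (List.nodup_cons.mp hnd).2) (pvStepPlus d dic c.1 c.2) (hstepnd hd)
      refine ⟨ind, ?_⟩
      intro k
      rw [List.foldl_cons, ig? k]
      by_cases hkt : k ∈ t
      · have hkc : k ≠ c := fun e => hct (e ▸ hkt)
        rw [if_pos hkt, if_pos (List.mem_cons_of_mem _ hkt), hstep k, if_neg hkc]
      · by_cases hkc : k = c
        · subst hkc
          rw [if_neg hkt, hstep k, if_pos rfl, if_pos List.mem_cons_self]
        · rw [if_neg hkt, hstep k, if_neg hkc, if_neg (by simp [hkt, hkc])]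

theorem pv_applyPlus_eq (s : List Int) (dic : PySem.Dict (Int × Int) Int) :
    pvApplyPlus dic s =
      (pvCells s).foldl (fun dic k => pvStepPlus (s.getD 5 0) dic k.1 k.2) dic := by
  unfold pvApplyPlus pvCells
  exact (pv_foldl_product (PySem.List.pyRange (s.getD 1 0) (s.getD 3 0 + 1))
    (PySem.List.pyRange (s.getD 2 0) (s.getD 4 0 + 1))
    (fun dic k => pvStepPlus (s.getD 5 0) dic k.1 k.2) dic).symm

theorem pv_applyPlus_char (s : List Int) (dic : PySem.Dict (Int × Int) Int) (hd : dic.keys.Nodup) :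
    (pvApplyPlus dic s).keys.Nodup ∧
    ∀ k, (pvApplyPlus dic s).get? k =
      if pvCovB s k = true
      then (dic.get? k).bind (fun v => if 0 < v + s.getD 5 0 then none else some (v + s.getD 5 0))
      else dic.get? k := by
  rw [pv_applyPlus_eq]
  obtain ⟨ind, ig?⟩ := pv_foldP_char (pvCells s) (pv_nodup_cells s) (s.getD 5 0) dic hd
  refine ⟨ind, ?_⟩
  intro k
  rw [ig? k]
  by_cases hc : pvCovB s k = true
  · rw [if_pos ((pv_mem_cells s k).mpr hc), if_pos hc]
  · rw [if_neg (fun e => hc ((pv_mem_cells s k).mp e)), if_neg hc]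

theorem pv_plusPhase_char {n m : Nat} (plus : List (List Int)) (hwf : ∀ s ∈ plus, pvWf n m s) :
    ∀ dic : PySem.Dict (Int × Int) Int, dic.keys.Nodup →
    (∀ k v, dic.get? k = some v → v ≤ 0) →
    ((plus.foldl pvApplyPlus dic).keys.Nodup ∧
     ∀ k, (plus.foldl pvApplyPlus dic).get? k =
      (dic.get? k).bind (fun v => if v + pvSumD plus k ≤ 0 then some (v + pvSumD plus k) else none)) := by
  induction plus with
  | nil =>
      intro dic hd hneg
      refine ⟨hd, ?_⟩
      intro k
      cases hv : dic.get? k with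
      | none => rw [List.foldl_nil, hv]; rfl
      | some v =>
          have := hneg k v hv
          rw [List.foldl_nil, hv]
          simp [pvSumD, this]
  | cons s t ih =>
      intro dic hd hneg
      have hws : pvWf n m s := hwf s List.mem_cons_self
      have hwt : ∀ s' ∈ t, pvWf n m s' := fun s' h => hwf s' (List.mem_cons_of_mem _ h)
      obtain ⟨hnd1, hg?⟩ := pv_applyPlus_char s dic hd
      have hneg1 : ∀ k v, (pvApplyPlus dic s).get? k = some v → v ≤ 0 := by
        intro k v hkv
        rw [hg? k] at hkv
        by_cases hc : pvCovB s k = true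
        · rw [if_pos hc] at hkv
          cases hv0 : dic.get? k with
          | none => rw [hv0] at hkv; simp at hkv
          | some v0 =>
              rw [hv0] at hkv
              simp only [Option.bind] at hkv
              by_cases hw : 0 < v0 + s.getD 5 0
              · rw [if_pos hw] at hkv; simp at hkv
              · rw [if_neg hw] at hkv
                simp only [Option.some.injEq] at hkv
                omega
        · rw [if_neg hc] at hkv
          exact hneg k v hkv
      obtain ⟨ind, ig?⟩ := ih hwt (pvApplyPlus dic s) hnd1 hneg1
      refine ⟨ind, ?_⟩
      intro k
      rw [List.foldl_cons, ig? k, hg? k]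
      have hSt : 0 ≤ pvSumD t k := pv_sumD_nonneg (n := n) (m := m) t hwt k
      by_cases hc : pvCovB s k = true
      · rw [if_pos hc, pv_sumD_cons, if_pos hc]
        cases hv0 : dic.get? k with
        | none => rfl
        | some v0 =>
            simp only [Option.bind]
            by_cases hw : 0 < v0 + s.getD 5 0
            · rw [if_pos hw]
              rw [if_neg (by omega)]
            · rw [if_neg hw]
              simp only [Option.bind]
              by_cases hle : v0 + s.getD 5 0 + pvSumD t k ≤ 0
              · rw [if_pos hle, if_pos (by omega)]
                congr 1
                ring
              · rw [if_neg hle, if_neg (by omega)]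
      · rw [if_neg hc, pv_sumD_cons, if_neg hc, zero_add]


-- final assembly

theorem pv_covB_mk (s : List Int) (i j : Int) : pvCovB s (i, j) = pvCovQ s i j := rfl

theorem pv_any_filter {α : Type} (l : List α) (p : α → Bool) (f : α → Int) :
    (!((l.filter p).map f).isEmpty) = l.any p := by
  rcases hlp : l.filter p with - | ⟨a, t⟩
  · have hany : l.any p = false := by
      rw [List.any_eq_false]
      intro x hx
      have := List.filter_eq_nil_iff.mp hlp x hx
      simpa using this
    rw [hany]
    simp
  · have ha : a ∈ l.filter p := by rw [hlp]; exact List.mem_cons_self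
    have := List.mem_filter.mp ha
    have hany : l.any p = true := List.any_eq_true.mpr ⟨a, this.1, this.2⟩
    rw [hany]
    simp

theorem pv_grid_count (n m : Nat) (P : Int × Int → Bool) :
    ((((pvGrid n m).filter P).length : Nat) : Int) =
      ((PySem.List.pyRange 0 (n : Int)).map
        (fun i => (((PySem.List.pyRange 0 (m : Int)).countP (fun j => P (i, j))) : Int))).sum := by
  simp only [pvGrid, SProd.sprod, List.product]
  rw [List.filter_flatMap, List.length_flatMap, Nat.cast_list_sum, List.map_map]
  congr 1
  apply List.map_congr_left
  intro i _
  simp only [Function.comp]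
  rw [← List.countP_eq_length_filter, List.countP_map]
  rfl

theorem pv_alt_eq (board skill : List (List Int)) (h : Pre_solution board skill) :
    solution_alt board skill =
      (board.length : Int) * ((board.getD 0 []).length : Int) -
        (((pvGrid board.length (board.getD 0 []).length).filter
          (pvDead board (skill.filter (fun s => s.getD 0 0 == 1))
            (skill.filter (fun s => s.getD 0 0 == 2)))).length : Int) := by
  obtain ⟨hne, hrect, hsk⟩ := h
  simp only [solution_alt]
  congr 1
  rw [pv_grid_count]
  rw [PySem.List.enumerate_eq_map_pyRange board [], List.map_map, PySem.List.len_eq]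
  congr 1
  apply List.map_congr_left
  intro i hi
  obtain ⟨hi0, hin⟩ := PySem.List.mem_pyRange_one.mp hi
  simp only [Function.comp_apply]
  have hrow : PySem.List.pyGetD board i [] = board.getD i.toNat [] :=
    PySem.List.pyGetD_of_nonneg board [] hi0
  have himem : i.toNat < board.length := by omega
  have hmem : board.getD i.toNat [] ∈ board := by
    rw [List.getD_eq_getElem?_getD, List.getElem?_eq_getElem himem]
    simp only [Option.getD_some]
    exact List.getElem_mem himem
  have hlen : PySem.List.len (PySem.List.pyGetD board i []) = ((board.getD 0 []).length : Int) := by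
    rw [PySem.List.len_eq, hrow, hrect _ hmem]
  rw [PySem.List.enumerate_eq_map_pyRange (PySem.List.pyGetD board i []) 0, List.countP_map, hlen]
  rw [Int.ofNat_eq_natCast, Nat.cast_inj]
  apply List.countP_congr
  intro j hj
  obtain ⟨hj0, hjm⟩ := PySem.List.mem_pyRange_one.mp hj
  have hb : PySem.List.pyGetD (PySem.List.pyGetD board i []) j 0 = pvGetv board (i, j) := by
    rw [PySem.List.pyGetD_of_nonneg _ _ hj0, hrow]
    rfl
  simp only [Function.comp_apply, pvDead, pvSumD, pvCovAny, pv_covB_mk, hb]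
  rw [← pv_any_filter (skill.filter (fun s => s.getD 0 0 == 1)) (fun s => pvCovQ s i j)
    (fun s => s.getD 5 0)]
  exact Iff.rfl

theorem pv_wf_filter (board skill : List (List Int)) (h : Pre_solution board skill) (t : Int)
    (ht : t = 1 ∨ t = 2) :
    ∀ s ∈ skill.filter (fun s => s.getD 0 0 == t),
      pvWf board.length (board.getD 0 []).length s := by
  intro s hs
  obtain ⟨hmem, heq⟩ := List.mem_filter.mp hs
  have h0 : s.getD 0 0 = t := by simpa using heq
  have hc := (h.2.2 s hmem).2 (by rcases ht with rfl | rfl; exacts [Or.inl h0, Or.inr h0])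
  intro k hcov
  unfold pvCovB pvCovQ at hcov
  simp only [decide_eq_true_eq] at hcov
  obtain ⟨a1, a2, a3, a4⟩ := hcov
  obtain ⟨b1, b2, b3, b4, b5⟩ := hc.2 ⟨le_trans a1 a2, le_trans a3 a4⟩
  exact ⟨⟨by omega, by omega, by omega, by omega⟩, b5⟩

theorem pv_size_eq (n m : Nat) (dic : PySem.Dict (Int × Int) Int) (hnd : dic.keys.Nodup)
    (P : Int × Int → Bool) (hgrid : ∀ k, P k = true → k ∈ pvGrid n m)
    (hchar : ∀ k, dic.get? k = none ↔ P k = false) :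
    (dic.size : Int) = (((pvGrid n m).filter P).length : Int) := by
  have hperm : dic.keys.Perm ((pvGrid n m).filter P) := by
    rw [List.perm_ext_iff_of_nodup hnd ((pv_nodup_grid n m).filter P)]
    intro a
    rw [List.mem_filter]
    constructor
    · intro ha
      have hnn : ¬ dic.get? a = none :=
        fun e => (PySem.Dict.get?_eq_none_iff_not_mem_keys dic a).mp e ha
      have hp : P a = true := by
        rcases Bool.eq_false_or_eq_true (P a) with hf | ht
        · exact hf
        · exact absurd ((hchar a).mpr ht) hnn
      exact ⟨hgrid a hp, hp⟩
    · rintro ⟨-, hp⟩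
      by_contra hk
      have := (PySem.Dict.get?_eq_none_iff_not_mem_keys dic a).mpr hk
      rw [hchar a] at this
      simp [hp] at this
  have hsz : dic.size = dic.keys.length := by
    simp [PySem.Dict.size, PySem.Dict.keys]
  rw [hsz, hperm.length_eq]

theorem pv_A_eq (board skill : List (List Int)) (h : Pre_solution board skill) :
    solution board skill =
      (board.length : Int) * ((board.getD 0 []).length : Int) -
        (((pvGrid board.length (board.getD 0 []).length).filter
          (pvDead board (skill.filter (fun s => s.getD 0 0 == 1))
            (skill.filter (fun s => s.getD 0 0 == 2)))).length : Int) := by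
  obtain ⟨hne, hrect, hsk⟩ := h
  simp only [solution]
  by_cases h1 : (skill.filter (fun x : List Int => x.getD 0 0 == 1)).length = 0
  · rw [if_pos h1]
    have hnil : skill.filter (fun x : List Int => x.getD 0 0 == 1) = [] :=
      List.length_eq_zero_iff.mp h1
    rw [List.filter_eq_nil_iff.mpr (fun k _ => by
      have hca : pvCovAny (skill.filter (fun s => s.getD 0 0 == 1)) k = false := by
        rw [hnil]; rfl
      simp only [pvDead, hca, Bool.false_and]
      exact Bool.false_ne_true)]
    simp
  · rw [if_neg h1]
    have hwf1 := pv_wf_filter board skill ⟨hne, hrect, hsk⟩ 1 (Or.inl rfl)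
    have hwf2 := pv_wf_filter board skill ⟨hne, hrect, hsk⟩ 2 (Or.inr rfl)
    obtain ⟨msh, mnd, mgv, mg?⟩ :=
      pv_minusPhase_char (skill.filter (fun s => s.getD 0 0 == 1)) hwf1 board PySem.Dict.empty
        ⟨rfl, hrect⟩ PySem.Dict.nodup_keys_empty
    by_cases h2 : ((skill.filter (fun x : List Int => x.getD 0 0 == 1)).foldl pvApplyMinus
        (board, PySem.Dict.empty)).2.items.isEmpty = true
    · rw [if_pos h2]
      rw [List.filter_eq_nil_iff.mpr ?hdead]
      · simp
      case hdead =>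
        intro k _ hcon
        simp only [pvDead, Bool.and_eq_true, decide_eq_true_eq] at hcon
        have := mg? k
        rw [if_pos ⟨hcon.1, hcon.2.1⟩, pv_get?_of_items_isEmpty _ h2 k] at this
        simp at this
    · rw [if_neg h2]
      have hneg : ∀ k v, ((skill.filter (fun x : List Int => x.getD 0 0 == 1)).foldl pvApplyMinus
          (board, PySem.Dict.empty)).2.get? k = some v → v ≤ 0 := by
        intro k v hv
        rw [mg? k] at hv
        by_cases hc : pvCovAny (skill.filter (fun s => s.getD 0 0 == 1)) k = true ∧
            pvGetv board k - pvSumD (skill.filter (fun s => s.getD 0 0 == 1)) k ≤ 0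
        · rw [if_pos hc] at hv
          cases hv
          exact hc.2
        · rw [if_neg hc, PySem.Dict.get?_empty] at hv
          simp at hv
      obtain ⟨fnd, fg?⟩ :=
        pv_plusPhase_char (skill.filter (fun s => s.getD 0 0 == 2)) hwf2 _ mnd hneg
      congr 1
      rw [pv_size_eq board.length (board.getD 0 []).length _ fnd _ ?hgrid ?hchar]
      case hgrid =>
        intro k hk
        simp only [pvDead, Bool.and_eq_true] at hk
        have hA := hk.1
        simp only [pvCovAny, List.any_eq_true] at hA
        obtain ⟨s', hs', hc'⟩ := hA
        exact (pv_mem_grid _ _ k).mpr (hwf1 s' hs' k hc').1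
      case hchar =>
        intro k
        rw [fg? k, mg? k, PySem.Dict.get?_empty]
        simp only [pvDead]
        by_cases hA : pvCovAny (skill.filter (fun s => s.getD 0 0 == 1)) k = true
        · by_cases hB : pvGetv board k - pvSumD (skill.filter (fun s => s.getD 0 0 == 1)) k ≤ 0
          · rw [if_pos ⟨hA, hB⟩]
            simp only [Option.bind]
            by_cases hC : pvGetv board k - pvSumD (skill.filter (fun s => s.getD 0 0 == 1)) k +
                pvSumD (skill.filter (fun s => s.getD 0 0 == 2)) k ≤ 0
            · rw [if_pos hC]
              exact iff_of_false (by simp)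
                (by rw [hA, decide_eq_true hB, decide_eq_true hC]; simp)
            · rw [if_neg hC]
              exact iff_of_true rfl (by rw [decide_eq_false hC]; simp)
          · rw [if_neg (fun hc => hB hc.2)]
            exact iff_of_true rfl (by rw [decide_eq_false hB]; simp)
        · rw [if_neg (fun hc => hA hc.1)]
          exact iff_of_true rfl (by rw [Bool.not_eq_true] at hA; rw [hA]; simp)

-- ===== VERDICT (by name: the statement is the Claim_ definition above) =====
theorem solution_spec : Claim_equal_solution := by
  intro board skill _ hpre
  unfold Spec_solution
  rw [pv_A_eq board skill hpre, pv_alt_eq board skill hpre]
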